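-- pv_equiv track=rewrite | github.com/ChengJianglin123/translation | google_translation.py | placeholder_replace
-- ===== SOURCE A (Python) =====
-- def placeholder_replace(pd_result_data):
--     """
--     给 web 和 ios app 用的把占位符替换成 web 前端和ios app 需要的占位符 {{a}}
--     :param pd_result_data:
--     :return:
--     """
--
--     placeholder_replace_list = ["{{z}}", "{{x}}", "{{a}}", "{{b}}", "{{c}}", "{{A}}", "{{B}}", "{{C}}"]
--     placeholder_replace_dict = {"{{z}}": "%@", "{{x}}": "%d", '{{a}}': "%1$d", "{{b}}": "%2$d", "{{c}}": "%3$d",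
--                                 '{{A}}': "%1$d", "{{B}}": "%2$d", "{{C}}": "%3$d"}
--
--     # 将全部原数据拆解出来
--     for a, b in pd_result_data.items():
--         new_list = []
--         # 将翻译后的数据进行替换
--         for i in b:
--             # 将翻译后的数据进行逐个检查和替换
--             for j in placeholder_replace_list:
--                 i = i.replace(j, placeholder_replace_dict[j])
--             new_list.append(i)
--         # 将原数据进行更新
--         pd_result_data[a] = new_list
--     return pd_result_data
-- ===== SOURCE B (Python) =====
-- _REPL = {"z": "%@", "x": "%d", "a": "%1$d", "b": "%2$d", "c": "%3$d",
--          "A": "%1$d", "B": "%2$d", "C": "%3$d"}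
--
--
-- def _scan(s):
--     # one left-to-right pass: replace every "{{k}}" (k a known key letter) at once
--     out = []
--     i = 0
--     n = len(s)
--     while i < n:
--         if (s[i] == "{" and i + 4 < n and s[i + 1] == "{"
--                 and s[i + 3] == "}" and s[i + 4] == "}" and s[i + 2] in _REPL):
--             out.append(_REPL[s[i + 2]])
--             i += 5
--         else:
--             out.append(s[i])
--             i += 1
--     return "".join(out)
--
--
-- def placeholder_replace(pd_result_data):
--     for a, b in pd_result_data.items():
--         pd_result_data[a] = [_scan(i) for i in b]
--     return pd_result_data
-- ===== Notes on version B (the rewrite author's own statement) =====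
-- stated objective: alternative
-- what changed: Replaces A's eight sequential full-string .replace passes per string with a single left-to-right scan that substitutes any '{{k}}' placeholder in one pass via a letter-to-value table (equivalent because replacement values contain no braces and placeholders never overlap); mutation of the dict argument is preserved.
import Mathlib
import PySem

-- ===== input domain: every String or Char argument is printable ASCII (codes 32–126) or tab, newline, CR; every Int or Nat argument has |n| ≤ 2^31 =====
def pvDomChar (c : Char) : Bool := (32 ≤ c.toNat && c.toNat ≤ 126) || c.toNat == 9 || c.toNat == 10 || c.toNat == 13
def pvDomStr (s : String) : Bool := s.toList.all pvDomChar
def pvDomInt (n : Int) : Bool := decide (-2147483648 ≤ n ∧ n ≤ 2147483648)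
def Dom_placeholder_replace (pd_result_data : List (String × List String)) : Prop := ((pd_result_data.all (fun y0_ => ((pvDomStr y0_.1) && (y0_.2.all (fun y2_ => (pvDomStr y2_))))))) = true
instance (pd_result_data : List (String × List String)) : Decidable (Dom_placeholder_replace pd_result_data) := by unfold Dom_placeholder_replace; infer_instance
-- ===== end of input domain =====

-- B replaces A's eight sequential .replace passes per string with one left-to-right scan
-- substituting any "{{k}}" placeholder via a letter table (objective: alternative).
-- Both Pythons mutate the dict argument in place (B keeps that); the equivalence proved
-- here is about the RETURN value (keys in order, each value list rebuilt).

-- ===== PORT A =====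
def pvKeyList : List String := ["{{z}}", "{{x}}", "{{a}}", "{{b}}", "{{c}}", "{{A}}", "{{B}}", "{{C}}"]
def pvKeyDict : PySem.Dict String String :=
  PySem.Dict.ofList [("{{z}}", "%@"), ("{{x}}", "%d"), ("{{a}}", "%1$d"), ("{{b}}", "%2$d"),
                     ("{{c}}", "%3$d"), ("{{A}}", "%1$d"), ("{{B}}", "%2$d"), ("{{C}}", "%3$d")]

-- A: for each (a, b) rebuild b, passing every string through the 8 .replace calls in order;
-- pd_result_data[a] = new_list only updates values of existing keys, so the items loop is a map.
-- dict[j]: every j ∈ pvKeyList is a key of pvKeyDict, so KeyError is impossible; ported as getD.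
def placeholder_replace (pd_result_data : List (String × List String)) : List (String × List String) :=
  pd_result_data.map (fun ab =>
    (ab.1, ab.2.map (fun i =>
      pvKeyList.foldl (fun i j => PySem.Str.replace i j (PySem.Dict.getD pvKeyDict j "")) i)))

-- ===== PORT B =====
def pvRepl (c : Char) : List Char :=
  if c = 'z' then ['%', '@']
  else if c = 'x' then ['%', 'd']
  else if c = 'a' ∨ c = 'A' then ['%', '1', '$', 'd']
  else if c = 'b' ∨ c = 'B' then ['%', '2', '$', 'd']
  else if c = 'c' ∨ c = 'C' then ['%', '3', '$', 'd']
  else []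

def pvLetters : List Char := ['z', 'x', 'a', 'b', 'c', 'A', 'B', 'C']

-- B's _scan: one pass; at each position, if the next five chars are "{{k}}" with k a key
-- letter in S, emit the replacement and jump 5, else copy one char.
def pvScan (S : List Char) : List Char → List Char
  | a :: b :: c :: d :: e :: t =>
      if a = '{' ∧ b = '{' ∧ d = '}' ∧ e = '}' ∧ c ∈ S then pvRepl c ++ pvScan S t
      else a :: pvScan S (b :: c :: d :: e :: t)
  | c0 :: t0 => c0 :: pvScan S t0
  | [] => []
termination_by cs => cs.length
decreasing_by all_goals (simp; try omega)

def placeholder_replace_alt (pd_result_data : List (String × List String)) : List (String × List String) :=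
  pd_result_data.map (fun ab =>
    (ab.1, ab.2.map (fun i => String.ofList (pvScan pvLetters i.toList))))

-- ===== PRECONDITION & SPEC =====
def Spec_placeholder_replace (pd_result_data : List (String × List String)) (out : List (String × List String)) : Prop := out = placeholder_replace_alt pd_result_data
instance (pd_result_data : List (String × List String)) (out : List (String × List String)) : Decidable (Spec_placeholder_replace pd_result_data out) := by unfold Spec_placeholder_replace; infer_instance

-- ===== CLAIM (what is proved, stated in full; the proofs are below) =====
def Claim_equal_placeholder_replace : Prop := ∀ (pd_result_data : List (String × List String)), Dom_placeholder_replace pd_result_data → Spec_placeholder_replace pd_result_data (placeholder_replace pd_result_data)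

-- ===== LEMMAS AND PROOFS =====

def pvKeyStr (k : Char) : List Char := ['{', '{', k, '}', '}']

-- the first-occurrence scan that Python's str.replace performs, specialised to a 5-char key
def pvRepl1 (k : Char) (nw : List Char) : List Char → List Char
  | [] => []
  | c :: t => if pvKeyStr k <+: (c :: t) then nw ++ pvRepl1 k nw ((c :: t).drop 5)
              else c :: pvRepl1 k nw t
termination_by cs => cs.length
decreasing_by all_goals simp

theorem pvScan_nil (S : List Char) : pvScan S [] = [] := by simp [pvScan]

theorem pvScan_shape (S : List Char) (c : Char) (t : List Char) :
    pvScan S ('{' :: '{' :: c :: '}' :: '}' :: t) =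
      if c ∈ S then pvRepl c ++ pvScan S t
      else '{' :: pvScan S ('{' :: c :: '}' :: '}' :: t) := by
  rw [pvScan]; simp

theorem pvScan_cons (S : List Char) (c0 : Char) (t0 : List Char)
    (h : ∀ c t, c0 :: t0 = '{' :: '{' :: c :: '}' :: '}' :: t → c ∉ S) :
    pvScan S (c0 :: t0) = c0 :: pvScan S t0 := by
  rcases t0 with _ | ⟨a1, _ | ⟨a2, _ | ⟨a3, _ | ⟨a4, t⟩⟩⟩⟩
  · simp [pvScan]
  · simp [pvScan]
  · simp [pvScan]
  · simp [pvScan]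
  · rw [pvScan]
    split_ifs with hc
    · obtain ⟨rfl, rfl, rfl, rfl, hmem⟩ := hc
      exact absurd hmem (h a2 t rfl)
    · rfl

theorem go_eq_pvRepl1 (k : Char) (nw : List Char) :
    ∀ (fuel : Nat) (l acc : List Char), l.length ≤ fuel →
      PySem.Chars.replace.go (pvKeyStr k) nw fuel l acc = acc.reverse ++ pvRepl1 k nw l := by
  intro fuel
  induction fuel with
  | zero =>
      intro l acc hl
      have hnil : l = [] := List.eq_nil_of_length_eq_zero (Nat.le_zero.mp hl)
      subst hnil
      rw [PySem.Chars.replace.go, pvRepl1]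
  | succ fuel ih =>
      intro l acc hl
      rcases l with _ | ⟨c, t⟩
      · rw [PySem.Chars.replace.go, pvRepl1]
        · simp
        · omega
      · rw [PySem.Chars.replace.go]
        by_cases hp : pvKeyStr k <+: (c :: t)
        · rw [if_pos (List.isPrefixOf_iff_prefix.mpr hp)]
          have hlen : ((c :: t).drop (pvKeyStr k).length).length ≤ fuel := by
            simp [pvKeyStr] at hl ⊢; omega
          rw [ih _ _ hlen, pvRepl1, if_pos hp]
          simp [pvKeyStr]
        · rw [if_neg (fun hb => hp (List.isPrefixOf_iff_prefix.mp hb))]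
          have hlen : t.length ≤ fuel := by simp at hl; omega
          rw [ih _ _ hlen, pvRepl1, if_neg hp]
          simp

theorem replace_eq_pvRepl1 (k : Char) (nw l : List Char) :
    PySem.Chars.replace l (pvKeyStr k) nw = pvRepl1 k nw l := by
  rw [PySem.Chars.replace, if_neg (by simp [pvKeyStr])]
  simpa using go_eq_pvRepl1 k nw l.length l [] (le_refl _)

theorem pvRepl1_not_prefix (k : Char) (nw : List Char) (c : Char) (t : List Char)
    (h : ¬ pvKeyStr k <+: (c :: t)) : pvRepl1 k nw (c :: t) = c :: pvRepl1 k nw t := by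
  rw [pvRepl1]; simp [h]

theorem pvRepl1_prefix (k : Char) (nw X : List Char) :
    pvRepl1 k nw (pvKeyStr k ++ X) = nw ++ pvRepl1 k nw X := by
  rw [pvKeyStr, List.cons_append, pvRepl1]
  simp [pvKeyStr]

theorem pvRepl1_append_left (k : Char) (nw : List Char) (pre X : List Char)
    (h : '{' ∉ pre) : pvRepl1 k nw (pre ++ X) = pre ++ pvRepl1 k nw X := by
  induction pre with
  | nil => simp
  | cons p pre ih =>
      have hp : p ≠ '{' := fun he => h (he ▸ List.mem_cons_self ..)
      have hnp : ¬ pvKeyStr k <+: (p :: (pre ++ X)) := by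
        intro hpre
        rcases List.cons_prefix_cons.mp hpre with ⟨h1, _⟩
        exact hp h1.symm
      rw [List.cons_append, pvRepl1_not_prefix _ _ _ _ hnp,
        ih (fun hm => h (List.mem_cons_of_mem _ hm))]
      simp

theorem pvRepl_head (c : Char) (h : c ∈ pvLetters) : ∃ r, pvRepl c = '%' :: r := by
  fin_cases h <;> exact ⟨_, rfl⟩

theorem pvRepl_no_brace (c : Char) (h : c ∈ pvLetters) : '{' ∉ pvRepl c := by
  fin_cases h <;> decide

theorem pvLetters_ne_brace (c : Char) (h : c ∈ pvLetters) : c ≠ '{' := by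
  fin_cases h <;> decide

theorem pvLetters_ne_pct (c : Char) (h : c ∈ pvLetters) : c ≠ '%' := by
  fin_cases h <;> decide

theorem pvScan_step (S : List Char) (hS : ∀ c ∈ S, c ∈ pvLetters) (a : Char) (p : List Char)
    (ha : a ≠ '%') :
    ∀ cs, (a :: p) <+: pvScan S cs → ∃ t', cs = a :: t' ∧ p <+: pvScan S t' := by
  intro cs h
  rcases cs with _ | ⟨c0, t0⟩
  · rw [pvScan_nil] at h; simp at h
  by_cases hshape : ∃ c t, c0 :: t0 = '{' :: '{' :: c :: '}' :: '}' :: t ∧ c ∈ S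
  · obtain ⟨c, t, heq, hcS⟩ := hshape
    obtain ⟨rfl, rfl⟩ : c0 = '{' ∧ t0 = '{' :: c :: '}' :: '}' :: t := by simpa using heq
    rw [pvScan_shape, if_pos hcS] at h
    obtain ⟨r, hr⟩ := pvRepl_head c (hS c hcS)
    rw [hr] at h
    rcases List.cons_prefix_cons.mp h with ⟨h1, _⟩
    exact absurd h1 ha
  · push_neg at hshape
    rw [pvScan_cons S c0 t0 (fun c t he => hshape c t he)] at h
    rcases List.cons_prefix_cons.mp h with ⟨rfl, h2⟩
    exact ⟨t0, rfl, h2⟩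

theorem pvScan_key_prefix (S : List Char) (hS : ∀ c ∈ S, c ∈ pvLetters) (k : Char)
    (hk : k ∈ pvLetters) (t0 : List Char) (h : ['{', k, '}', '}'] <+: pvScan S t0) :
    ∃ t4, t0 = '{' :: k :: '}' :: '}' :: t4 := by
  obtain ⟨t1, rfl, h1⟩ := pvScan_step S hS '{' [k, '}', '}'] (by decide) t0 h
  obtain ⟨t2, rfl, h2⟩ := pvScan_step S hS k ['}', '}'] (pvLetters_ne_pct k hk) t1 h1
  obtain ⟨t3, rfl, h3⟩ := pvScan_step S hS '}' ['}'] (by decide) t2 h2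
  obtain ⟨t4, rfl, _⟩ := pvScan_step S hS '}' [] (by decide) t3 h3
  exact ⟨t4, rfl⟩

theorem pvMain (k : Char) (hk : k ∈ pvLetters) :
    ∀ (n : Nat) (S : List Char), (∀ c ∈ S, c ∈ pvLetters) → k ∉ S →
      ∀ cs : List Char, cs.length ≤ n →
        pvRepl1 k (pvRepl k) (pvScan S cs) = pvScan (k :: S) cs := by
  intro n
  induction n with
  | zero =>
      intro S hS hkS cs hcs
      have hnil : cs = [] := List.eq_nil_of_length_eq_zero (Nat.le_zero.mp hcs)
      subst hnil
      rw [pvScan_nil, pvScan_nil, pvRepl1]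
  | succ n ih =>
      intro S hS hkS cs hcs
      rcases cs with _ | ⟨c0, t0⟩
      · rw [pvScan_nil, pvScan_nil, pvRepl1]
      by_cases hshape : ∃ c t, c0 :: t0 = '{' :: '{' :: c :: '}' :: '}' :: t
      · obtain ⟨c, t, heq⟩ := hshape
        obtain ⟨rfl, rfl⟩ : c0 = '{' ∧ t0 = '{' :: c :: '}' :: '}' :: t := by simpa using heq
        have htlen : t.length ≤ n := by simp at hcs; omega
        by_cases hcS : c ∈ S
        · rw [pvScan_shape, if_pos hcS,
            pvRepl1_append_left _ _ _ _ (pvRepl_no_brace c (hS c hcS)),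
            ih S hS hkS t htlen,
            pvScan_shape, if_pos (List.mem_cons_of_mem _ hcS)]
        · by_cases hck : c = k
          · subst hck
            have hcl : c ∈ pvLetters := hk
            have hcb : c ≠ '{' := pvLetters_ne_brace c hcl
            rw [pvScan_shape, if_neg hcS]
            rw [pvScan_cons S ('{') (c :: '}' :: '}' :: t)
                  (by intro c' t' he; exfalso; simp_all)]
            rw [pvScan_cons S c ('}' :: '}' :: t)
                  (by intro c' t' he; exfalso; simp_all)]
            rw [pvScan_cons S ('}') ('}' :: t)
                  (by intro c' t' he; exfalso; simp_all)]
            rw [pvScan_cons S ('}') t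
                  (by intro c' t' he; exfalso; simp_all)]
            have : ('{' :: '{' :: c :: '}' :: '}' :: pvScan S t)
                = pvKeyStr c ++ pvScan S t := by simp [pvKeyStr]
            rw [this, pvRepl1_prefix, ih S hS hkS t htlen,
              pvScan_shape, if_pos (List.mem_cons_self ..)]
          · have ht0len : ('{' :: c :: '}' :: '}' :: t).length ≤ n := by simp at hcs ⊢; omega
            rw [pvScan_shape, if_neg hcS]
            have hnp : ¬ pvKeyStr k <+: ('{' :: pvScan S ('{' :: c :: '}' :: '}' :: t)) := by
              intro hpre
              rcases List.cons_prefix_cons.mp hpre with ⟨_, h2⟩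
              obtain ⟨t4, ht4⟩ := pvScan_key_prefix S hS k hk _ h2
              have h' : c = k ∧ t = t4 := by simpa using ht4
              exact hck h'.1
            rw [pvRepl1_not_prefix _ _ _ _ hnp, ih S hS hkS _ ht0len,
              pvScan_shape, if_neg (by simp [hck, hcS])]
      · push_neg at hshape
        have hnone : ∀ c t, c0 :: t0 = '{' :: '{' :: c :: '}' :: '}' :: t → c ∉ S :=
          fun c t he => absurd he (hshape c t)
        have hnone' : ∀ c t, c0 :: t0 = '{' :: '{' :: c :: '}' :: '}' :: t → c ∉ k :: S :=
          fun c t he => absurd he (hshape c t)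
        have ht0len : t0.length ≤ n := by simp at hcs; omega
        rw [pvScan_cons S c0 t0 hnone, pvScan_cons (k :: S) c0 t0 hnone']
        have hnp : ¬ pvKeyStr k <+: (c0 :: pvScan S t0) := by
          intro hpre
          rcases List.cons_prefix_cons.mp hpre with ⟨h1, h2⟩
          obtain ⟨t4, ht4⟩ := pvScan_key_prefix S hS k hk t0 h2
          exact hshape k t4 (by rw [ht4, ← h1])
        rw [pvRepl1_not_prefix _ _ _ _ hnp, ih S hS hkS t0 ht0len]

theorem pvScan_empty (cs : List Char) : pvScan [] cs = cs := by
  induction hn : cs.length using Nat.strong_induction_on generalizing cs with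
  | _ n ih =>
      rcases cs with _ | ⟨c0, t0⟩
      · rw [pvScan_nil]
      · rw [pvScan_cons [] c0 t0 (by simp)]
        subst hn
        rw [ih t0.length (by simp) t0 rfl]

theorem pvScan_congr (S S' : List Char) (h : ∀ c, c ∈ S ↔ c ∈ S') :
    ∀ cs, pvScan S cs = pvScan S' cs := by
  intro cs
  induction hn : cs.length using Nat.strong_induction_on generalizing cs with
  | _ n ih =>
      rcases cs with _ | ⟨c0, t0⟩
      · rw [pvScan_nil, pvScan_nil]
      subst hn
      by_cases hshape : ∃ c t, c0 :: t0 = '{' :: '{' :: c :: '}' :: '}' :: t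
      · obtain ⟨c, t, heq⟩ := hshape
        obtain ⟨rfl, rfl⟩ : c0 = '{' ∧ t0 = '{' :: c :: '}' :: '}' :: t := by simpa using heq
        rw [pvScan_shape, pvScan_shape]
        by_cases hcS : c ∈ S
        · rw [if_pos hcS, if_pos ((h c).mp hcS), ih t.length (by simp only [List.length_cons]; omega) t rfl]
        · rw [if_neg hcS, if_neg (fun hm => hcS ((h c).mpr hm)),
            ih ('{' :: c :: '}' :: '}' :: t).length (by simp only [List.length_cons]; omega) _ rfl]
      · push_neg at hshape
        rw [pvScan_cons S c0 t0 (fun c t he => absurd he (hshape c t)),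
          pvScan_cons S' c0 t0 (fun c t he => absurd he (hshape c t)),
          ih t0.length (by simp) t0 rfl]

set_option maxRecDepth 8192 in
theorem pvPerString (s : String) :
    pvKeyList.foldl (fun i j => PySem.Str.replace i j (PySem.Dict.getD pvKeyDict j "")) s =
      String.ofList (pvScan pvLetters s.toList) := by
  have key : ∀ (k : Char) (S : List Char), k ∈ pvLetters → (∀ c ∈ S, c ∈ pvLetters) → k ∉ S →
      ∀ l : List Char, pvRepl1 k (pvRepl k) (pvScan S l) = pvScan (k :: S) l :=
    fun k S hk hS hkS l => pvMain k hk l.length S hS hkS l le_rfl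
  have h : (pvKeyList.foldl (fun i j => PySem.Str.replace i j (PySem.Dict.getD pvKeyDict j "")) s).toList
      = pvScan pvLetters s.toList := by
    simp only [pvKeyList, List.foldl]
    have dz : PySem.Dict.getD pvKeyDict "{{z}}" "" = "%@" := rfl
    have dx : PySem.Dict.getD pvKeyDict "{{x}}" "" = "%d" := rfl
    have da : PySem.Dict.getD pvKeyDict "{{a}}" "" = "%1$d" := rfl
    have db : PySem.Dict.getD pvKeyDict "{{b}}" "" = "%2$d" := rfl
    have dc : PySem.Dict.getD pvKeyDict "{{c}}" "" = "%3$d" := rfl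
    have dA : PySem.Dict.getD pvKeyDict "{{A}}" "" = "%1$d" := rfl
    have dB : PySem.Dict.getD pvKeyDict "{{B}}" "" = "%2$d" := rfl
    have dC : PySem.Dict.getD pvKeyDict "{{C}}" "" = "%3$d" := rfl
    rw [dz, dx, da, db, dc, dA, dB, dC]
    simp only [PySem.Str.toList_replace]
    have tz : ("{{z}}" : String).toList = pvKeyStr 'z' := rfl
    have tx : ("{{x}}" : String).toList = pvKeyStr 'x' := rfl
    have ta : ("{{a}}" : String).toList = pvKeyStr 'a' := rfl
    have tb : ("{{b}}" : String).toList = pvKeyStr 'b' := rfl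
    have tc : ("{{c}}" : String).toList = pvKeyStr 'c' := rfl
    have tA : ("{{A}}" : String).toList = pvKeyStr 'A' := rfl
    have tB : ("{{B}}" : String).toList = pvKeyStr 'B' := rfl
    have tC : ("{{C}}" : String).toList = pvKeyStr 'C' := rfl
    have rz : ("%@" : String).toList = pvRepl 'z' := rfl
    have rx : ("%d" : String).toList = pvRepl 'x' := rfl
    have ra : ("%1$d" : String).toList = pvRepl 'a' := rfl
    have rb : ("%2$d" : String).toList = pvRepl 'b' := rfl
    have rc : ("%3$d" : String).toList = pvRepl 'c' := rfl
    rw [tz, rz, tx, rx, ta, ra, tb, rb, tc, rc]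
    rw [tA, tB, tC]
    simp only [replace_eq_pvRepl1]
    conv_lhs => rw [← pvScan_empty s.toList]
    rw [key 'z' [] (by decide) (by intro c hc; cases hc) (by decide),
      key 'x' ['z'] (by decide) (by intro c hc; fin_cases hc <;> decide) (by decide),
      key 'a' ['x', 'z'] (by decide) (by intro c hc; fin_cases hc <;> decide) (by decide),
      key 'b' ['a', 'x', 'z'] (by decide) (by intro c hc; fin_cases hc <;> decide) (by decide),
      key 'c' ['b', 'a', 'x', 'z'] (by decide) (by intro c hc; fin_cases hc <;> decide) (by decide)]
    rw [show pvRepl 'a' = pvRepl 'A' from rfl,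
      key 'A' ['c', 'b', 'a', 'x', 'z'] (by decide) (by intro c hc; fin_cases hc <;> decide) (by decide)]
    rw [show pvRepl 'b' = pvRepl 'B' from rfl,
      key 'B' ['A', 'c', 'b', 'a', 'x', 'z'] (by decide) (by intro c hc; fin_cases hc <;> decide) (by decide)]
    rw [show pvRepl 'c' = pvRepl 'C' from rfl,
      key 'C' ['B', 'A', 'c', 'b', 'a', 'x', 'z'] (by decide) (by intro c hc; fin_cases hc <;> decide) (by decide)]
    exact pvScan_congr _ _ (by intro c; constructor <;> (intro h; fin_cases h <;> decide)) s.toList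
  calc pvKeyList.foldl (fun i j => PySem.Str.replace i j (PySem.Dict.getD pvKeyDict j "")) s
      = String.ofList (pvKeyList.foldl (fun i j => PySem.Str.replace i j (PySem.Dict.getD pvKeyDict j "")) s).toList := String.ofList_toList.symm
    _ = String.ofList (pvScan pvLetters s.toList) := by rw [h]

-- ===== VERDICT (by name: the statement is the Claim_ definition above) =====
theorem placeholder_replace_spec : Claim_equal_placeholder_replace := by
  intro pd _
  unfold Spec_placeholder_replace placeholder_replace placeholder_replace_alt
  have h : (fun i : String => pvKeyList.foldl (fun i j => PySem.Str.replace i j (PySem.Dict.getD pvKeyDict j "")) i)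
      = (fun i : String => String.ofList (pvScan pvLetters i.toList)) := funext pvPerString
  rw [h]
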